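-- pv_equiv track=rewrite | github.com/luelueFLY/mindstudio-skills | src/msagent/agent.py | _matches_path_segments
-- ===== SOURCE A (Python) =====
-- def _matches_path_segments(query: str, rel_path: str) -> bool:
--     parts = [p for p in query.split("/") if p]
--     if not parts:
--         return False
--     target_parts = rel_path.split("/")
--     idx = 0
--     for part in parts:
--         found = False
--         while idx < len(target_parts):
--             if part in target_parts[idx]:
--                 found = True
--                 idx += 1
--                 break
--             idx += 1
--         if not found:
--             return False
--     return True
-- ===== SOURCE B (Python) =====
-- def _matches_path_segments(query: str, rel_path: str) -> bool:
--     parts = [p for p in query.split("/") if p]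
--     if not parts:
--         return False
--     j = len(parts)
--     for seg in reversed(rel_path.split("/")):
--         if j and parts[j - 1] in seg:
--             j -= 1
--     return j == 0
-- ===== Notes on version B (the rewrite author's own statement) =====
-- stated objective: alternative
-- what changed: B matches back-to-front: one reverse pass over the path segments consuming query parts from the last backwards, instead of A's forward loop over parts with an inner index scan; correct because an in-order substring embedding exists iff one exists on the reversed lists.
import Mathlib
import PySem

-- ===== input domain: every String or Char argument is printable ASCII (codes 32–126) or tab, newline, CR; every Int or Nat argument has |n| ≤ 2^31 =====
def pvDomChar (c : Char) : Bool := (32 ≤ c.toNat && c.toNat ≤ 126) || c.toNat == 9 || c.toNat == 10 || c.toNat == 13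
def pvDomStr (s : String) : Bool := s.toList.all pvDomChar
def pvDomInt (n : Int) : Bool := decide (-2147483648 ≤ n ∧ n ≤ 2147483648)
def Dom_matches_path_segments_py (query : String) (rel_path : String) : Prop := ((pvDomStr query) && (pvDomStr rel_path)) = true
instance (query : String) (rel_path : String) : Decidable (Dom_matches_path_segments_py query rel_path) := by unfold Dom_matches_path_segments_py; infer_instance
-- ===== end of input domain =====

-- B matches back-to-front: one reverse pass over the path segments consuming query parts from
-- the last one backwards, instead of A's forward loop over parts with an inner index scan
-- (objective: alternative; correct because an in-order embedding exists iff one exists reversed).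

-- s.split("/"): sep is the literal nonempty "/", so split? never returns none; getD [] is unreachable
def pvSplitSlash (s : String) : List String := (PySem.Str.split? s "/").getD []

-- ===== PORT A =====
-- the 'while idx < len(target_parts)' loop of A: returns the idx after the break, or none if the scan fell off the end
def pvAInner (part : String) (targets : List String) (idx : Nat) : Option Nat :=
  if h : idx < targets.length then
    if PySem.Str.isIn part targets[idx] then some (idx + 1)
    else pvAInner part targets (idx + 1)
  else none
termination_by targets.length - idx

-- the 'for part in parts' loop of A
def pvALoop (parts : List String) (targets : List String) (idx : Nat) : Bool :=
  match parts with
  | [] => true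
  | p :: rest =>
    match pvAInner p targets idx with
    | none => false                      -- 'if not found: return False'
    | some idx' => pvALoop rest targets idx'

def matches_path_segments_py (query : String) (rel_path : String) : Bool :=
  let parts := (pvSplitSlash query).filter (fun p => p ≠ "")
  if parts = [] then false
  else pvALoop parts (pvSplitSlash rel_path) 0

-- ===== PORT B =====
-- 'for seg in reversed(rel_path.split("/"))' with the down-counter j into parts
def matches_path_segments_py_alt (query : String) (rel_path : String) : Bool :=
  let parts := (pvSplitSlash query).filter (fun p => p ≠ "")
  if parts = [] then false
  else
    let j := (pvSplitSlash rel_path).reverse.foldl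
      (fun j seg => if 0 < j ∧ PySem.Str.isIn (parts.getD (j - 1) "") seg = true then j - 1 else j)
      parts.length
    decide (j = 0)

-- ===== PRECONDITION & SPEC =====
def Spec_matches_path_segments_py (query : String) (rel_path : String) (out : Bool) : Prop := out = matches_path_segments_py_alt query rel_path
instance (query : String) (rel_path : String) (out : Bool) : Decidable (Spec_matches_path_segments_py query rel_path out) := by unfold Spec_matches_path_segments_py; infer_instance

-- ===== CLAIM (what is proved, stated in full; the proofs are below) =====
def Claim_equal_matches_path_segments_py : Prop := ∀ (query : String) (rel_path : String), Dom_matches_path_segments_py query rel_path → Spec_matches_path_segments_py query rel_path (matches_path_segments_py query rel_path)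

-- ===== LEMMAS AND PROOFS =====

-- reference greedy matcher (forward)
def pvG : List String → List String → Bool
  | [], _ => true
  | _ :: _, [] => false
  | p :: ps, t :: ts => if PySem.Str.isIn p t then pvG ps ts else pvG (p :: ps) ts

-- the semantic relation: parts embed in order into the segments, each part a substring of its segment
def pvM (ps ts : List String) : Prop :=
  ∃ ts', ts'.Sublist ts ∧ List.Forall₂ (fun p t => PySem.Str.isIn p t = true) ps ts'

theorem pvALoop_eq_g (ts : List String) :
    ∀ (k : Nat) (parts : List String) (idx : Nat),
      parts.length + (ts.length - idx) ≤ k →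
      pvALoop parts ts idx = pvG parts (ts.drop idx) := by
  intro k
  induction k with
  | zero =>
    intro parts idx hk
    match parts with
    | [] => simp [pvALoop, pvG]
    | p :: ps => simp at hk
  | succ n ih =>
    intro parts idx hk
    match parts with
    | [] => simp [pvALoop, pvG]
    | p :: ps =>
      by_cases h : idx < ts.length
      · rw [List.drop_eq_getElem_cons h]
        rw [pvALoop, pvAInner, dif_pos h]
        by_cases hin : PySem.Str.isIn p ts[idx] = true
        · rw [if_pos hin]
          rw [pvG, if_pos hin]
          exact ih ps (idx + 1) (by simp at hk ⊢; omega)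
        · rw [if_neg hin]
          rw [pvG, if_neg hin]
          have := ih (p :: ps) (idx + 1) (by simp at hk ⊢; omega)
          rw [pvALoop] at this
          exact this
      · have hd : ts.drop idx = [] := List.drop_eq_nil_of_le (by omega)
        rw [hd, pvALoop, pvAInner, dif_neg h, pvG]

-- the greedy matcher decides pvM
theorem pvG_iff_M : ∀ (ts ps : List String), pvG ps ts = true ↔ pvM ps ts := by
  intro ts
  induction ts with
  | nil =>
    intro ps
    match ps with
    | [] => simp [pvG, pvM]
    | p :: ps' =>
      simp only [pvG, pvM]
      constructor
      · intro h; cases h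
      · rintro ⟨ts', hsub, hf⟩
        rw [List.sublist_nil] at hsub
        subst hsub
        cases hf
  | cons t ts ih =>
    intro ps
    match ps with
    | [] =>
      simp only [pvG, pvM]
      exact ⟨fun _ => ⟨[], List.nil_sublist _, List.Forall₂.nil⟩, fun _ => by simp⟩
    | p :: ps' =>
      rw [pvG]
      by_cases hin : PySem.Str.isIn p t = true
      · rw [if_pos hin, ih ps']
        constructor
        · rintro ⟨us, hsub, hf⟩
          exact ⟨t :: us, List.Sublist.cons₂ t hsub, List.Forall₂.cons hin hf⟩
        · rintro ⟨us, hsub, hf⟩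
          rcases hf with _ | ⟨hpu, hf'⟩
          rename_i u us'
          cases hsub with
          | cons _ hsub' =>
            exact ⟨us', (List.sublist_cons_self u us').trans hsub', hf'⟩
          | cons₂ _ hsub' => exact ⟨us', hsub', hf'⟩
      · rw [if_neg hin, ih (p :: ps')]
        constructor
        · rintro ⟨us, hsub, hf⟩
          exact ⟨us, hsub.cons t, hf⟩
        · rintro ⟨us, hsub, hf⟩
          rcases hf with _ | ⟨hpu, hf'⟩
          rename_i u us'
          cases hsub with
          | cons _ hsub' => exact ⟨u :: us', hsub', List.Forall₂.cons hpu hf'⟩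
          | cons₂ _ hsub' => exact absurd hpu hin

-- the relation is invariant under reversing both lists
theorem pvM_reverse (ps ts : List String) : pvM ps ts ↔ pvM ps.reverse ts.reverse := by
  constructor
  · rintro ⟨us, hsub, hf⟩
    exact ⟨us.reverse, hsub.reverse, List.rel_reverse hf⟩
  · rintro ⟨us, hsub, hf⟩
    refine ⟨us.reverse, ?_, ?_⟩
    · simpa using hsub.reverse
    · have := List.rel_reverse hf
      simpa using this

theorem pvG_reverse (ps ts : List String) : pvG ps ts = pvG ps.reverse ts.reverse := by
  have h1 := pvG_iff_M ts ps
  have h2 := pvG_iff_M ts.reverse ps.reverse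
  have h3 := pvM_reverse ps ts
  cases hg : pvG ps ts
  · cases hg' : pvG ps.reverse ts.reverse
    · rfl
    · exact absurd (h1.mpr (h3.mpr (h2.mp hg'))) (by simp [hg])
  · exact (h2.mpr (h3.mp (h1.mp hg))).symm

-- forward up-counter fold (the shape the down-counter fold is reduced to)
def pvUp (parts : List String) (segs : List String) (i : Nat) : Nat :=
  segs.foldl
    (fun i seg => if i < parts.length ∧ PySem.Str.isIn (parts.getD i "") seg = true then i + 1 else i) i

theorem pvUp_le (parts : List String) :
    ∀ (segs : List String) (i : Nat), i ≤ parts.length → pvUp parts segs i ≤ parts.length := by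
  intro segs
  induction segs with
  | nil => intro i hi; exact hi
  | cons t ts ih =>
    intro i hi
    rw [pvUp, List.foldl_cons]
    split_ifs with h
    · exact ih (i + 1) h.1
    · exact ih i hi

theorem pvUp_eq_g (parts : List String) :
    ∀ (segs : List String) (i : Nat), i ≤ parts.length →
      decide (pvUp parts segs i = parts.length) = pvG (parts.drop i) segs := by
  intro segs
  induction segs with
  | nil =>
    intro i hi
    by_cases h : i = parts.length
    · subst h; simp [pvUp, pvG]
    · have hlt : i < parts.length := lt_of_le_of_ne hi h
      rw [List.drop_eq_getElem_cons hlt]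
      simp [pvUp, pvG, h]
  | cons t ts ih =>
    intro i hi
    by_cases hlt : i < parts.length
    · rw [List.drop_eq_getElem_cons hlt, pvG]
      have hg : parts.getD i "" = parts[i] := List.getD_eq_getElem parts "" hlt
      by_cases hin : PySem.Str.isIn parts[i] t = true
      · rw [if_pos hin, pvUp, List.foldl_cons, if_pos ⟨hlt, by rw [hg]; exact hin⟩]
        exact ih (i + 1) (by omega)
      · rw [if_neg hin, pvUp, List.foldl_cons, if_neg (by rw [hg]; exact fun ⟨_, h2⟩ => hin h2)]
        rw [← List.drop_eq_getElem_cons hlt]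
        exact ih i hi
    · have hi' : i = parts.length := le_antisymm hi (le_of_not_gt hlt)
      have hd : parts.drop i = [] := List.drop_eq_nil_of_le (by omega)
      rw [hd, pvUp, List.foldl_cons, if_neg (fun ⟨h1, _⟩ => hlt h1)]
      have := ih i hi
      rw [hd, pvUp] at this
      simpa [pvG] using this

-- B's down-counter over parts is the up-counter over parts.reverse
theorem pvDown_eq_up (parts : List String) :
    ∀ (segs : List String) (j : Nat), j ≤ parts.length →
      segs.foldl
        (fun j seg => if 0 < j ∧ PySem.Str.isIn (parts.getD (j - 1) "") seg = true then j - 1 else j) j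
      = parts.length - pvUp parts.reverse segs (parts.length - j) := by
  intro segs
  induction segs with
  | nil =>
    intro j hj
    simp only [List.foldl_nil, pvUp]
    omega
  | cons t ts ih =>
    intro j hj
    rw [List.foldl_cons, pvUp, List.foldl_cons]
    set n := parts.length with hn
    by_cases hpos : 0 < j
    · have hidx : n - 1 - (n - j) = j - 1 := by omega
      have hget : parts.reverse.getD (n - j) "" = parts.getD (j - 1) "" := by
        have hlt : n - j < parts.reverse.length := by simp; omega
        have hlt2 : j - 1 < parts.length := by omega
        rw [List.getD_eq_getElem _ _ hlt, List.getD_eq_getElem _ _ hlt2]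
        rw [List.getElem_reverse]
        simp only [← hn, hidx]
      by_cases hin : PySem.Str.isIn (parts.getD (j - 1) "") t = true
      · rw [if_pos ⟨hpos, hin⟩, if_pos ⟨by simp [← hn]; omega, by rw [hget]; exact hin⟩]
        have : n - j + 1 = n - (j - 1) := by omega
        rw [this]
        exact ih (j - 1) (by omega)
      · rw [if_neg (fun h => hin h.2), if_neg (fun h => hin (by rw [← hget]; exact h.2))]
        exact ih j hj
    · have hj0 : j = 0 := by omega
      subst hj0
      rw [if_neg (by simp), if_neg (by simp [← hn])]
      exact ih 0 (by omega)

-- ===== VERDICT (by name: the statement is the Claim_ definition above) =====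
theorem matches_path_segments_py_spec : Claim_equal_matches_path_segments_py := by
  intro query rel_path _
  unfold Spec_matches_path_segments_py matches_path_segments_py matches_path_segments_py_alt
  set parts := (pvSplitSlash query).filter (fun p => p ≠ "") with hp
  by_cases hn : parts = []
  · simp [hn]
  · rw [if_neg hn, if_neg hn]
    set segs := pvSplitSlash rel_path with hs
    have ha := pvALoop_eq_g segs (parts.length + segs.length) parts 0 (by omega)
    simp only [List.drop_zero] at ha
    rw [ha]
    have hdown := pvDown_eq_up parts segs.reverse parts.length (le_refl _)
    simp only [Nat.sub_self] at hdown
    rw [hdown]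
    have hub := pvUp_le parts.reverse segs.reverse 0 (Nat.zero_le _)
    have hup := pvUp_eq_g parts.reverse segs.reverse 0 (Nat.zero_le _)
    simp only [List.drop_zero] at hup
    have hlen : parts.reverse.length = parts.length := by simp
    rw [hlen] at hub
    have : decide (parts.length - pvUp parts.reverse segs.reverse 0 = 0)
         = decide (pvUp parts.reverse segs.reverse 0 = parts.reverse.length) := by
      rw [hlen]
      by_cases h : pvUp parts.reverse segs.reverse 0 = parts.length
      · simp [h]
      · have : parts.length - pvUp parts.reverse segs.reverse 0 ≠ 0 := by omega
        simp [h, this]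
    rw [this, hup, ← pvG_reverse]
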